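-- pv_equiv track=rewrite | github.com/kranzerj/365-EntraID-generic.graph | summarize_o365_audit.py | extract_known_ops_from_token
-- ===== SOURCE A (Python) =====
-- KNOWN_OPS = [
--     "UserLoginFailed", "UserLoggedIn", "Update", "SharingSet",
--     "SharingInheritanceBroken", "Send", "SecureLinkUpdated", "SecureLinkCreated",
--     "PageViewed", "New-InboxRule", "MoveToDeletedItems", "MailItemsAccessed",
--     "FileAccessedExtended", "FileAccessed", "Create", "AddedToSecureLink",
-- ]
--
-- def extract_known_ops_from_token(token: str, ops=KNOWN_OPS):
--     """
--     Zerlegt einen Token (z. B. 'MailItemsAccessedUpdate') in bekannte Operationen.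
--     Greedy, längste Treffer bevorzugt, keine Regex-Backtracking-Probleme.
--     """
--     if not token:
--         return []
--     tlow = token.lower()
--     occurrences = []
--     for op in sorted(ops, key=len, reverse=True):
--         olow = op.lower()
--         start = 0
--         while True:
--             idx = tlow.find(olow, start)
--             if idx == -1:
--                 break
--             occurrences.append((idx, op, len(op)))
--             start = idx + len(op)
--     # Sortiere nach Startindex (aufsteigend), bei Gleichstand längere zuerst
--     occurrences.sort(key=lambda x: (x[0], -x[2]))
--
--     result = []
--     consumed_until = -1
--     for idx, op, length in occurrences:
--         if idx >= consumed_until: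
--             result.append(op)
--             consumed_until = idx + length
--     return result
-- ===== SOURCE B (Python) =====
-- KNOWN_OPS = [
--     "UserLoginFailed", "UserLoggedIn", "Update", "SharingSet",
--     "SharingInheritanceBroken", "Send", "SecureLinkUpdated", "SecureLinkCreated",
--     "PageViewed", "New-InboxRule", "MoveToDeletedItems", "MailItemsAccessed",
--     "FileAccessedExtended", "FileAccessed", "Create", "AddedToSecureLink",
-- ]
--
-- def extract_known_ops_from_token(token: str, ops=KNOWN_OPS):
--     # No global occurrence list, no sort of occurrences, no consumed_until sweep:
--     # record the winning op per start position in a first-writer-wins dict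
--     # (ops visited longest first), then walk the token left to right once.
--     if not token:
--         return []
--     tlow = token.lower()
--     best = {}
--     for op in sorted(ops, key=len, reverse=True):
--         olow = op.lower()
--         idx = tlow.find(olow)
--         while idx != -1:
--             if idx not in best:
--                 best[idx] = op
--             idx = tlow.find(olow, idx + len(op))
--     result = []
--     p = 0
--     while p < len(tlow):
--         op = best.get(p)
--         if op is not None:
--             result.append(op)
--             p += len(op)
--         else:
--             p += 1
--     return result
-- ===== Notes on version B (the rewrite author's own statement) =====
-- stated objective: faster
-- what changed: B drops A's collect-all-occurrence-tuples + global (idx,-len) sort + consumed_until interval sweep and instead records one first-writer-wins dict entry per match start position (ops visited longest first) and emits the result in a single left-to-right index scan.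
import Mathlib
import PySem

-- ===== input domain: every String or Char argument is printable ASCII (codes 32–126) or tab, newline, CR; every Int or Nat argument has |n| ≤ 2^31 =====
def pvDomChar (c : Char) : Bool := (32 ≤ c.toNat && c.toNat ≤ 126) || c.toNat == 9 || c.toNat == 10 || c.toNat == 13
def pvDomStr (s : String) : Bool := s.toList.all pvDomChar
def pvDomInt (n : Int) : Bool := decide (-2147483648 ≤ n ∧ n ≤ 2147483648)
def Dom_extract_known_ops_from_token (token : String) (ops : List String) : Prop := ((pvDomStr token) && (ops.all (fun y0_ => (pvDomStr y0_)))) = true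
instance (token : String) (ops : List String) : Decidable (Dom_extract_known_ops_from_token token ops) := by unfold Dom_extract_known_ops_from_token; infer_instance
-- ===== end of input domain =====

-- B replaces A's collect-all-occurrences + global tuple sort + consumed_until sweep by a
-- first-writer-wins position dictionary and one left-to-right index scan (measurably faster: no occurrence sort).

-- ===== PORT A =====
-- A's inner 'while True: idx = tlow.find(olow, start)' occurrence loop
def pvA_findAll (tl ol : List Char) (op : String) (start : Nat) (fuel : Nat) :
    List (Int × String × Int) :=
  match fuel with
  | 0 => []
  | fuel + 1 =>
    let idx := PySem.Chars.findFrom tl ol (start : Int)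
    if idx = -1 then []
    else (idx, op, (op.toList.length : Int)) :: pvA_findAll tl ol op (idx.toNat + op.toList.length) fuel

def extract_known_ops_from_token (token : String) (ops : List String) : List String :=
  if token.toList = [] then []
  else
    let tl := PySem.Chars.lower token.toList
    let occurrences := (PySem.List.sorted ops (fun op => PySem.Str.len op) true).foldl
      (fun acc op => acc ++ pvA_findAll tl (PySem.Chars.lower op.toList) op 0 (tl.length + 1)) []
    -- Python sorts the tuple keys (x[0], -x[2]) lexicographically: exact via Lex (Int × Int)
    let sortedOcc := PySem.List.sorted occurrences (fun t => toLex (t.1, -t.2.2))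
    (sortedOcc.foldl (fun (st : List String × Int) t =>
        if st.2 ≤ t.1 then (st.1 ++ [t.2.1], t.1 + t.2.2) else st) (([] : List String), (-1 : Int))).1

-- ===== PORT B =====
-- Source B's 'while idx != -1' marking loop (first-writer-wins dict entry per start index)
def pvB_markAll (tl ol : List Char) (op : String) (idx : Int) (best : PySem.Dict Int String)
    (fuel : Nat) : PySem.Dict Int String :=
  match fuel with
  | 0 => best
  | fuel + 1 =>
    if idx = -1 then best
    else
      let best' := if best.contains idx then best else best.insert idx op
      pvB_markAll tl ol op (PySem.Chars.findFrom tl ol ((idx.toNat + op.toList.length : Nat) : Int)) best' fuel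

-- Source B's 'while p < len(tlow)' left-to-right scan
def pvB_scan (best : PySem.Dict Int String) (p n : Nat) (acc : List String) (fuel : Nat) :
    List String :=
  match fuel with
  | 0 => acc
  | fuel + 1 =>
    if p < n then
      match best.get? (p : Int) with
      | some op => pvB_scan best (p + op.toList.length) n (acc ++ [op]) fuel
      | none => pvB_scan best (p + 1) n acc fuel
    else acc

def extract_known_ops_from_token_alt (token : String) (ops : List String) : List String :=
  if token.toList = [] then []
  else
    let tl := PySem.Chars.lower token.toList
    let best := (PySem.List.sorted ops (fun op => PySem.Str.len op) true).foldl
      (fun best op => pvB_markAll tl (PySem.Chars.lower op.toList) op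
        (PySem.Chars.find tl (PySem.Chars.lower op.toList)) best (tl.length + 1)) PySem.Dict.empty
    pvB_scan best 0 tl.length [] (tl.length + 1)

-- ===== PRECONDITION & SPEC =====
-- Pre_ excludes only inputs on which A never returns: with a nonempty token and "" among ops,
-- A's 'tlow.find("", start)' loop re-finds the empty string at the same index forever (B loops too).
def Pre_extract_known_ops_from_token (token : String) (ops : List String) : Prop :=
  "" ∈ ops → token = ""
instance (token : String) (ops : List String) : Decidable (Pre_extract_known_ops_from_token token ops) := by unfold Pre_extract_known_ops_from_token; infer_instance

def pvWitness_extract_known_ops_from_token : String × List String :=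
  ("mailitemsaccessedUPDATExCreate", ["Update", "MailItemsAccessed", "Create", "Send"])

def Spec_extract_known_ops_from_token (token : String) (ops : List String) (out : List String) : Prop := out = extract_known_ops_from_token_alt token ops
instance (token : String) (ops : List String) (out : List String) : Decidable (Spec_extract_known_ops_from_token token ops out) := by unfold Spec_extract_known_ops_from_token; infer_instance

-- ===== CLAIM (what is proved, stated in full; the proofs are below) =====
def Claim_equal_extract_known_ops_from_token : Prop := ∀ (token : String) (ops : List String), Dom_extract_known_ops_from_token token ops → Pre_extract_known_ops_from_token token ops → Spec_extract_known_ops_from_token token ops (extract_known_ops_from_token token ops)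

-- ===== LEMMAS AND PROOFS =====

-- the common greedy occurrence-index list both inner loops enumerate
def pvOcc (tl ol : List Char) (m : Nat) (start : Nat) (fuel : Nat) : List Int :=
  match fuel with
  | 0 => []
  | fuel + 1 =>
    let idx := PySem.Chars.findFrom tl ol (start : Int)
    if idx = -1 then [] else idx :: pvOcc tl ol m (idx.toNat + m) fuel

-- A's consumed_until sweep, as a structural recursion
def pvSweep : List (Int × String × Int) → Int → List String
  | [], _ => []
  | t :: S, c => if c ≤ t.1 then t.2.1 :: pvSweep S (t.1 + t.2.2) else pvSweep S c

def pvKey (t : Int × String × Int) : Lex (Int × Int) := toLex (t.1, -t.2.2)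

def pvGood (n : Nat) (t : Int × String × Int) : Prop :=
  0 ≤ t.1 ∧ t.1.toNat + t.2.2.toNat ≤ n ∧ t.2.2 = (t.2.1.toList.length : Int) ∧ 1 ≤ t.2.2

def pvBlock (tl : List Char) (op : String) : List (Int × String × Int) :=
  (pvOcc tl (PySem.Chars.lower op.toList) op.toList.length 0 (tl.length + 1)).map
    (fun i => (i, op, (op.toList.length : Int)))

def pvP (tl : List Char) (sops : List String) : List (Int × String × Int) :=
  sops.flatMap (pvBlock tl)

theorem pvA_findAll_eq (tl ol : List Char) (op : String) : ∀ (fuel start : Nat),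
    pvA_findAll tl ol op start fuel
      = (pvOcc tl ol op.toList.length start fuel).map (fun i => (i, op, (op.toList.length : Int))) := by
  intro fuel
  induction fuel with
  | zero => intro start; rfl
  | succ fuel ih =>
    intro start
    simp only [pvA_findAll, pvOcc]
    split
    · rfl
    · simp [ih]

theorem pvB_markAll_eq (tl ol : List Char) (op : String) : ∀ (fuel start : Nat) (best : PySem.Dict Int String),
    pvB_markAll tl ol op (PySem.Chars.findFrom tl ol (start : Int)) best fuel
      = (pvOcc tl ol op.toList.length start fuel).foldl
          (fun b i => if b.contains i then b else b.insert i op) best := by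
  intro fuel
  induction fuel with
  | zero => intro start best; rfl
  | succ fuel ih =>
    intro start best
    simp only [pvB_markAll, pvOcc]
    split
    · rfl
    · simp only [List.foldl_cons]
      exact ih _ _

theorem pvSweep_foldl : ∀ (S : List (Int × String × Int)) (acc : List String) (c : Int),
    (S.foldl (fun (st : List String × Int) t =>
        if st.2 ≤ t.1 then (st.1 ++ [t.2.1], t.1 + t.2.2) else st) (acc, c)).1 = acc ++ pvSweep S c := by
  intro S
  induction S with
  | nil => intro acc c; simp [pvSweep]
  | cons t S ih =>
    intro acc c
    simp only [List.foldl_cons, pvSweep]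
    split
    · rw [ih]; simp
    · rw [ih]

theorem pvSweep_nil_of (S : List (Int × String × Int)) (c : Int) (h : ∀ t ∈ S, t.1 < c) :
    pvSweep S c = [] := by
  induction S with
  | nil => rfl
  | cons t S ih =>
    simp only [pvSweep]
    rw [if_neg (by have := h t (by simp); omega)]
    exact ih (fun t ht => h t (by simp [ht]))

theorem pvSweep_shift (S : List (Int × String × Int)) (c : Int) (h : ∀ t ∈ S, t.1 ≠ c) :
    pvSweep S c = pvSweep S (c + 1) := by
  induction S with
  | nil => rfl
  | cons t S ih =>
    have ht := h t (by simp)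
    simp only [pvSweep]
    by_cases hc : c ≤ t.1
    · rw [if_pos hc, if_pos (by omega)]
    · rw [if_neg hc, if_neg (by omega)]
      exact ih (fun t ht => h t (by simp [ht]))

theorem pvSweep_found (S : List (Int × String × Int)) (c : Int) (t₀ : Int × String × Int)
    (hpair : S.Pairwise (fun a b => a.1 ≤ b.1))
    (hfind : S.find? (fun t => t.1 == c) = some t₀)
    (hlen : ∀ t ∈ S, 1 ≤ t.2.2) :
    pvSweep S c = t₀.2.1 :: pvSweep S (c + t₀.2.2) := by
  have h1 : 1 ≤ t₀.2.2 := hlen t₀ (List.mem_of_find?_eq_some hfind)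
  induction S with
  | nil => simp at hfind
  | cons t S ih =>
    by_cases hp : t.1 = c
    · rw [List.find?_cons_of_pos (by simp [hp])] at hfind
      cases hfind
      simp only [pvSweep]
      rw [if_pos (le_of_eq hp.symm), if_neg (by omega), hp]
    · rw [List.find?_cons_of_neg (by simp [hp])] at hfind
      have hmem : t₀ ∈ S := List.mem_of_find?_eq_some hfind
      have htle : t.1 ≤ t₀.1 := (List.pairwise_cons.mp hpair).1 t₀ hmem
      have ht0c : t₀.1 = c := by simpa using List.find?_some hfind
      have htlt : t.1 < c := lt_of_le_of_ne (ht0c ▸ htle) hp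
      simp only [pvSweep]
      rw [if_neg (by omega), if_neg (by omega)]
      exact ih (List.pairwise_cons.mp hpair).2 hfind (fun t ht => hlen t (by simp [ht]))

theorem pvOcc_good (tl ol : List Char) (m : Nat) (hm : ol.length = m) (hm1 : 1 ≤ m) :
    ∀ (fuel start : Nat), start ≤ tl.length →
      ∀ i ∈ pvOcc tl ol m start fuel, 0 ≤ i ∧ i.toNat + m ≤ tl.length := by
  intro fuel
  induction fuel with
  | zero => intro start _ i hi; simp [pvOcc] at hi
  | succ fuel ih =>
    intro start hstart i hi
    simp only [pvOcc] at hi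
    by_cases hne : PySem.Chars.findFrom tl ol (start : Int) = -1
    · rw [if_pos hne] at hi; simp at hi
    · rw [if_neg hne] at hi
      obtain ⟨h1, h2, -⟩ := PySem.Chars.findFrom_natCast_spec tl ol start hstart hne
      set idx := PySem.Chars.findFrom tl ol (start : Int) with hidx
      have h0 : 0 ≤ idx := le_trans (by positivity) h1
      have hpl : ol.length ≤ (tl.drop idx.toNat).length := h2.length_le
      have hbound : idx.toNat + m ≤ tl.length := by
        simp only [List.length_drop] at hpl; omega
      rcases List.mem_cons.mp hi with rfl | hi'
      · exact ⟨h0, hbound⟩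
      · exact ih (idx.toNat + m) (by omega) i hi'

theorem pvDict_get (P : List (Int × String × Int)) : ∀ (b : PySem.Dict Int String) (q : Int),
    (P.foldl (fun b t => if b.contains t.1 then b else b.insert t.1 t.2.1) b).get? q
      = (b.get? q).or ((P.find? (fun t => t.1 == q)).map (fun t => t.2.1)) := by
  induction P with
  | nil => intro b q; simp
  | cons t P ih =>
    intro b q
    simp only [List.foldl_cons]
    rw [ih]
    by_cases hq : t.1 = q
    · by_cases hc : b.contains t.1
      · rw [if_pos hc]
        have : (b.get? q).isSome := by
          rw [← hq]; rw [PySem.Dict.contains_eq_isSome_get?] at hc; exact hc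
        obtain ⟨v, hv⟩ := Option.isSome_iff_exists.mp this
        simp [hv]
      · rw [if_neg hc]
        have hnone : b.get? q = none := by
          rw [← hq]
          rw [PySem.Dict.contains_eq_isSome_get?] at hc
          simpa using hc
        rw [List.find?_cons_of_pos (by simp [hq])]
        subst hq
        simp [hnone, PySem.Dict.get?_insert_self]
    · have hstep : (if b.contains t.1 then b else b.insert t.1 t.2.1).get? q = b.get? q := by
        split
        · rfl
        · exact PySem.Dict.get?_insert_of_ne b t.2.1 (fun h => hq h.symm)
      rw [hstep, List.find?_cons_of_neg (by simp [hq])]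

theorem pvFilter_insertBy (x : Int × String × Int) (acc : List (Int × String × Int))
    (hs : acc.Pairwise (fun a b => pvKey a ≤ pvKey b))
    (h : ∀ y ∈ acc, y.1 = x.1 → pvKey y ≤ pvKey x) (q : Int) :
    (PySem.List.insertBy (fun a b => decide (pvKey a < pvKey b)) x acc).filter (fun t => t.1 == q)
      = acc.filter (fun t => t.1 == q) ++ if x.1 == q then [x] else [] := by
  induction acc with
  | nil =>
    simp only [PySem.List.insertBy, List.filter_nil, List.nil_append]
    by_cases hx : x.1 = q <;> simp [hx]
  | cons y acc ih =>
    simp only [PySem.List.insertBy]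
    by_cases hlt : pvKey x < pvKey y
    · rw [if_pos (by simpa using hlt)]
      by_cases hx : x.1 = q
      · have hempty : (y :: acc).filter (fun t => t.1 == q) = [] := by
          rw [List.filter_eq_nil_iff]
          intro y' hy'
          simp only [beq_iff_eq]
          intro hy'q
          have h1 : pvKey y' ≤ pvKey x := h y' hy' (by omega)
          have h2 : pvKey y ≤ pvKey y' := by
            rcases List.mem_cons.mp hy' with rfl | hmem
            · exact le_refl _
            · exact (List.pairwise_cons.mp hs).1 y' hmem
          exact absurd (lt_of_le_of_lt (le_trans h2 h1) hlt) (lt_irrefl _)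
        rw [List.filter_cons_of_pos (by simp [hx]), hempty]
        simp [hx]
      · rw [List.filter_cons_of_neg (by simp [hx])]
        simp [hx]
    · rw [if_neg (by simpa using hlt)]
      have ih' := ih (List.pairwise_cons.mp hs).2 (fun y' hy' => h y' (by simp [hy']))
      by_cases hy : y.1 = q
      · rw [List.filter_cons_of_pos (by simp [hy]), List.filter_cons_of_pos (by simp [hy]), ih']
        simp
      · rw [List.filter_cons_of_neg (by simp [hy]), List.filter_cons_of_neg (by simp [hy]), ih']

theorem pvFoldl_insertBy_filter : ∀ (rest acc : List (Int × String × Int)),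
    acc.Pairwise (fun a b => pvKey a ≤ pvKey b) →
    (∀ x ∈ rest, ∀ y ∈ acc, y.1 = x.1 → pvKey y ≤ pvKey x) →
    rest.Pairwise (fun a b => a.1 = b.1 → pvKey a ≤ pvKey b) →
    ∀ q : Int,
      (rest.foldl (fun acc x => PySem.List.insertBy (fun a b => decide (pvKey a < pvKey b)) x acc) acc).filter
          (fun t => t.1 == q)
        = acc.filter (fun t => t.1 == q) ++ rest.filter (fun t => t.1 == q) := by
  intro rest
  induction rest with
  | nil => intro acc _ _ _ q; simp
  | cons x rest ih =>
    intro acc hs H Hrest q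
    simp only [List.foldl_cons]
    have hs' := PySem.List.insertBy_pairwise_le pvKey x acc hs
    have H' : ∀ z ∈ rest, ∀ y ∈ PySem.List.insertBy (fun a b => decide (pvKey a < pvKey b)) x acc,
        y.1 = z.1 → pvKey y ≤ pvKey z := by
      intro z hz y hy hyz
      rcases (PySem.List.insertBy_mem_iff _ x y acc).mp hy with rfl | hmem
      · exact (List.pairwise_cons.mp Hrest).1 z hz hyz
      · exact H z (by simp [hz]) y hmem hyz
    rw [ih _ hs' H' (List.pairwise_cons.mp Hrest).2 q,
        pvFilter_insertBy x acc hs (H x (by simp)) q]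
    by_cases hx : x.1 = q
    · rw [List.filter_cons_of_pos (by simp [hx])]
      simp [hx]
    · rw [List.filter_cons_of_neg (by simp [hx])]
      simp [hx]

theorem pvStable (P : List (Int × String × Int))
    (hP : P.Pairwise (fun a b => a.1 = b.1 → pvKey a ≤ pvKey b)) (q : Int) :
    (PySem.List.sorted P pvKey).filter (fun t => t.1 == q) = P.filter (fun t => t.1 == q) := by
  rw [PySem.List.sorted_eq_foldl_insertBy]
  simpa using pvFoldl_insertBy_filter P [] (by simp) (by simp) hP q

theorem pvScan_eq (best : PySem.Dict Int String) (S P : List (Int × String × Int)) (n : Nat)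
    (hbest : ∀ q : Int, best.get? q = (P.find? (fun t => t.1 == q)).map (fun t => t.2.1))
    (hfilter : ∀ q : Int, S.filter (fun t => t.1 == q) = P.filter (fun t => t.1 == q))
    (hpair : S.Pairwise (fun a b => a.1 ≤ b.1))
    (hgoodS : ∀ t ∈ S, pvGood n t) :
    ∀ (fuel p : Nat) (acc : List String), n ≤ p + fuel →
      pvB_scan best p n acc fuel = acc ++ pvSweep S (p : Int) := by
  have hnil : ∀ p : Nat, n ≤ p → pvSweep S (p : Int) = [] := by
    intro p hp
    apply pvSweep_nil_of
    intro t ht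
    obtain ⟨h0, hb, -, h1⟩ := hgoodS t ht
    omega
  have hfindSP : ∀ q : Int, S.find? (fun t => t.1 == q) = P.find? (fun t => t.1 == q) := by
    intro q
    rw [← List.head?_filter, ← List.head?_filter, hfilter]
  intro fuel
  induction fuel with
  | zero =>
    intro p acc hp
    simp only [pvB_scan]
    rw [hnil p (by omega)]
    simp
  | succ fuel ih =>
    intro p acc hp
    simp only [pvB_scan]
    by_cases hpn : p < n
    · rw [if_pos hpn]
      rcases hB : best.get? (p : Int) with _ | op <;> dsimp only
      · have hF : P.find? (fun t => t.1 == (p : Int)) = none := by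
          have := (hbest (p : Int)).symm.trans hB
          exact Option.map_eq_none_iff.mp this
        have hshift : pvSweep S (p : Int) = pvSweep S ((p : Int) + 1) := by
          apply pvSweep_shift
          intro t ht htp
          have hnone : S.find? (fun t => t.1 == (p : Int)) = none := by rw [hfindSP, hF]
          have hne := List.find?_eq_none.mp hnone t ht
          exact hne (by simp [htp])
        rw [ih (p + 1) acc (by omega), hshift]
        push_cast
        ring_nf
      · obtain ⟨t₀, hF, hop⟩ : ∃ t₀, P.find? (fun t => t.1 == (p : Int)) = some t₀ ∧ t₀.2.1 = op := by
          have := (hbest (p : Int)).symm.trans hB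
          rcases Option.map_eq_some_iff.mp this with ⟨t₀, h1, h2⟩
          exact ⟨t₀, h1, h2⟩
        have hfS : S.find? (fun t => t.1 == (p : Int)) = some t₀ := by rw [hfindSP, hF]
        have ht₀S : t₀ ∈ S := List.mem_of_find?_eq_some hfS
        obtain ⟨h0, hb, hlenEq, h1⟩ := hgoodS t₀ ht₀S
        have hsweep := pvSweep_found S (p : Int) t₀ hpair hfS (fun t ht => (hgoodS t ht).2.2.2)
        have hcast : ((p + op.toList.length : Nat) : Int) = (p : Int) + t₀.2.2 := by
          rw [hlenEq, hop]; push_cast; ring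
        rw [ih (p + op.toList.length) (acc ++ [op]) (by omega), hcast, hsweep, hop]
        simp
    · rw [if_neg hpn]
      rw [hnil p (by omega)]
      simp

theorem main_eq (token : String) (ops : List String)
    (hPre : "" ∈ ops → token = "") :
    extract_known_ops_from_token token ops = extract_known_ops_from_token_alt token ops := by
  by_cases h0 : token.toList = []
  · simp [extract_known_ops_from_token, extract_known_ops_from_token_alt, h0]
  · set tl := PySem.Chars.lower token.toList with htl
    set n := tl.length with hn
    set sops := PySem.List.sorted ops (fun op => PySem.Str.len op) true with hsops
    have hops : ∀ op ∈ sops, op.toList ≠ [] := by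
      intro op hop hnil
      have hmem : op ∈ ops := (PySem.List.sorted_perm ops (fun op => PySem.Str.len op) true).mem_iff.mp hop
      have : op = "" := String.toList_eq_nil_iff.mp hnil
      subst this
      exact h0 (by simp [hPre hmem])
    set P := pvP tl sops with hP
    -- (2) A's occurrence list is P
    have hocc : sops.foldl
        (fun acc op => acc ++ pvA_findAll tl (PySem.Chars.lower op.toList) op 0 (tl.length + 1)) [] = P := by
      have hfun : (fun op => pvA_findAll tl (PySem.Chars.lower op.toList) op 0 (tl.length + 1))
          = pvBlock tl := by
        funext op
        rw [pvA_findAll_eq]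
        rfl
      rw [PySem.List.foldl_append_eq_flatMap, List.nil_append, hfun, hP, pvP]
    -- (3) B's dict is the first-writer fold over P
    have hbestP : sops.foldl
        (fun best op => pvB_markAll tl (PySem.Chars.lower op.toList) op
          (PySem.Chars.find tl (PySem.Chars.lower op.toList)) best (tl.length + 1)) PySem.Dict.empty
        = P.foldl (fun b t => if b.contains t.1 then b else b.insert t.1 t.2.1) PySem.Dict.empty := by
      have hfun : (fun (best : PySem.Dict Int String) op => pvB_markAll tl (PySem.Chars.lower op.toList) op
            (PySem.Chars.find tl (PySem.Chars.lower op.toList)) best (tl.length + 1))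
          = (fun b op => (pvBlock tl op).foldl
              (fun b t => if b.contains t.1 then b else b.insert t.1 t.2.1) b) := by
        funext b op
        rw [← PySem.Chars.findFrom_zero, ← Nat.cast_zero, pvB_markAll_eq, pvBlock, List.foldl_map]
      rw [hfun, hP, pvP, List.foldl_flatMap]
    -- (4) every occurrence tuple is good
    have hgoodP : ∀ t ∈ P, pvGood n t := by
      intro t ht
      rw [hP, pvP, List.mem_flatMap] at ht
      obtain ⟨op, hop, htb⟩ := ht
      rw [pvBlock, List.mem_map] at htb
      obtain ⟨i, hi, rfl⟩ := htb
      have hm1 : 1 ≤ op.toList.length := List.length_pos_of_ne_nil (hops op hop)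
      have := pvOcc_good tl (PySem.Chars.lower op.toList) op.toList.length
        (by simp [PySem.Chars.lower]) hm1 (tl.length + 1) 0 (Nat.zero_le _) i hi
      refine ⟨this.1, by simpa using this.2, rfl, by show (1:Int) ≤ ((op.toList.length : Nat) : Int); exact_mod_cast hm1⟩
    -- (5) same-index occurrences appear in non-increasing length order in P
    have hPpair : P.Pairwise (fun a b => a.1 = b.1 → pvKey a ≤ pvKey b) := by
      rw [hP, pvP, List.flatMap_def, List.pairwise_flatten]
      constructor
      · intro l hl
        rw [List.mem_map] at hl
        obtain ⟨op, -, rfl⟩ := hl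
        apply List.pairwise_of_forall_mem_list
        intro a ha b hb
        simp only [pvBlock, List.mem_map] at ha hb
        obtain ⟨i, -, rfl⟩ := ha
        obtain ⟨j, -, rfl⟩ := hb
        intro hij
        simp only at hij
        simp [pvKey, hij]
      · rw [List.pairwise_map]
        have hlen : sops.Pairwise (fun a b => PySem.Str.len b ≤ PySem.Str.len a) :=
          PySem.List.sorted_pairwise_rev ops (fun op => PySem.Str.len op)
        refine hlen.imp ?_
        intro a b hba x hx y hy hxy
        simp only [pvBlock, List.mem_map] at hx hy
        obtain ⟨i, -, rfl⟩ := hx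
        obtain ⟨j, -, rfl⟩ := hy
        simp only at hxy
        simp only [PySem.Str.len_eq] at hba
        have hba' : (b.toList.length : Int) ≤ (a.toList.length : Int) := hba
        simp only [pvKey]
        rw [Prod.Lex.le_iff]
        right
        exact ⟨hxy, by show -((a.toList.length:Nat):Int) ≤ -((b.toList.length:Nat):Int); omega⟩
    set S := PySem.List.sorted P (fun t => toLex (t.1, -t.2.2)) with hS
    have hSkey : S = PySem.List.sorted P pvKey := rfl
    have hSperm : S.Perm P := PySem.List.sorted_perm P _ false
    have hgoodS : ∀ t ∈ S, pvGood n t := fun t ht => hgoodP t (hSperm.subset ht)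
    have hpairS : S.Pairwise (fun a b => a.1 ≤ b.1) := by
      have := PySem.List.sorted_pairwise P pvKey
      rw [← hSkey] at this
      refine this.imp ?_
      intro a b hab
      rcases Prod.Lex.le_iff.mp hab with h | ⟨h, -⟩
      · exact le_of_lt h
      · exact le_of_eq h
    have hfilter : ∀ q : Int, S.filter (fun t => t.1 == q) = P.filter (fun t => t.1 == q) := by
      intro q
      rw [hSkey]
      exact pvStable P hPpair q
    -- assemble
    have hbest : ∀ q : Int,
        (P.foldl (fun b t => if b.contains t.1 then b else b.insert t.1 t.2.1) PySem.Dict.empty).get? q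
          = (P.find? (fun t => t.1 == q)).map (fun t => t.2.1) := by
      intro q
      rw [pvDict_get]
      have : (PySem.Dict.empty : PySem.Dict Int String).get? q = none := by simp [pysem]
      rw [this, Option.none_or]
    rw [extract_known_ops_from_token, extract_known_ops_from_token_alt, if_neg h0, if_neg h0]
    simp only
    rw [hocc, hbestP, ← hS]
    rw [pvSweep_foldl S [] (-1), List.nil_append]
    have hA : pvSweep S (-1) = pvSweep S 0 := by
      have := pvSweep_shift S (-1) (fun t ht => by have := (hgoodS t ht).1; omega)
      simpa using this
    rw [hA]
    rw [pvScan_eq (P.foldl (fun b t => if b.contains t.1 then b else b.insert t.1 t.2.1) PySem.Dict.empty)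
        S P n hbest hfilter hpairS hgoodS (tl.length + 1) 0 [] (by omega), List.nil_append]
    norm_num

-- ===== VERDICT (by name: the statement is the Claim_ definition above) =====
theorem extract_known_ops_from_token_spec : Claim_equal_extract_known_ops_from_token := by
  intro token ops _ hPre
  show extract_known_ops_from_token token ops = extract_known_ops_from_token_alt token ops
  exact main_eq token ops hPre
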